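-- pv_equiv track=rewrite | github.com/izumism/algorithms | strings/burrows_wheeler.py | decorate_index
-- ===== SOURCE A (Python) =====
-- IndexedChar = (str, int)
--
-- def decorate_index(bw_code: str) -> [IndexedChar]:
--     counter = {}
--     result = []
--     for ch in bw_code:
--         if ch in counter:
--             counter[ch] += 1
--         else:
--             counter[ch] = 0
--         result.append((ch, counter[ch]))
--     return result
-- ===== SOURCE B (Python) =====
-- def decorate_index(bw_code: str) -> list:
--     # Per-character scatter: for each distinct character (first-appearance
--     # order), scan the string once numbering its occurrences 0,1,2,... and
--     # write them into a preallocated output slot by position.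
--     out = [None] * len(bw_code)
--     for c in dict.fromkeys(bw_code):
--         k = 0
--         for i, ch in enumerate(bw_code):
--             if ch == c:
--                 out[i] = (c, k)
--                 k += 1
--     return out
-- ===== Notes on version B (the rewrite author's own statement) =====
-- stated objective: alternative
-- what changed: Replaces A's single pass with a running dict counter by a per-distinct-character algorithm: preallocate the output, then for each distinct character (dict.fromkeys order) scan the string once, numbering that character's occurrences 0,1,2,... and scattering them into the output by position.
import Mathlib
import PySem

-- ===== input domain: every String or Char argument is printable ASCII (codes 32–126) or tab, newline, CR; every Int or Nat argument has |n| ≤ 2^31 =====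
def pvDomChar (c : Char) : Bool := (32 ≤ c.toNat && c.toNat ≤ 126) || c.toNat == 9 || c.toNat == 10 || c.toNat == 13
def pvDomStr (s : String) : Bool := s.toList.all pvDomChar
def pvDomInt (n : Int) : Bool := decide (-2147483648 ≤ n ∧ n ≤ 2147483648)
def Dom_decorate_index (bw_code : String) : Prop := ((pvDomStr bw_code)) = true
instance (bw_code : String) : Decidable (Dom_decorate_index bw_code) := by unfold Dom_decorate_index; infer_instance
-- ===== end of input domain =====

-- B replaces A's one-pass running dict counter by a per-distinct-character scatter:
-- one scan per distinct character, numbering its occurrences and writing them into a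
-- preallocated output by position (alternative decomposition, not faster).

-- ===== PORT A =====
-- counter[ch] after the update always has the key, so the lookup is ported as getD with default 0 (never reached).
def aStep (st : PySem.Dict Char Int × List (String × Int)) (ch : Char) :
    PySem.Dict Char Int × List (String × Int) :=
  let counter := if st.1.contains ch then st.1.modify ch 0 (· + 1) else st.1.insert ch 0
  (counter, st.2 ++ [(String.ofList [ch], counter.getD ch 0)])

def decorate_index (bw_code : String) : List (String × Int) :=
  (bw_code.toList.foldl aStep (PySem.Dict.empty, [])).2

-- ===== PORT B =====
-- inner loop 'for i, ch in enumerate(bw_code): if ch == c: out[i] = (c, k); k += 1'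
-- (the enumerate index is the running position i, always in range, so out[i]=… is List.set)
def bInner (c : Char) : List Char → Nat → Int → List (Option (String × Int)) → List (Option (String × Int))
  | [], _, _, out => out
  | ch :: l, i, k, out =>
      if ch = c then bInner c l (i + 1) (k + 1) (out.set i (some (String.ofList [c], k)))
      else bInner c l (i + 1) k out

-- 'dict.fromkeys(bw_code)' = distinct characters in first-appearance order = PySem.List.dedup.
-- Every slot of out is written (for c = its own character), so the final 'o.getD …' default is never used.
def decorate_index_alt (bw_code : String) : List (String × Int) :=
  let out := List.replicate bw_code.toList.length (none : Option (String × Int))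
  let final := (PySem.List.dedup bw_code.toList).foldl (fun o c => bInner c bw_code.toList 0 0 o) out
  final.map (fun o => o.getD (String.ofList [], 0))

-- ===== PRECONDITION & SPEC =====
def Spec_decorate_index (bw_code : String) (out : List (String × Int)) : Prop := out = decorate_index_alt bw_code
instance (bw_code : String) (out : List (String × Int)) : Decidable (Spec_decorate_index bw_code out) := by unfold Spec_decorate_index; infer_instance

-- ===== CLAIM (what is proved, stated in full; the proofs are below) =====
def Claim_equal_decorate_index : Prop := ∀ (bw_code : String), Dom_decorate_index bw_code → Spec_decorate_index bw_code (decorate_index bw_code)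

-- ===== LEMMAS AND PROOFS =====

-- common characterisation: the result, as structural recursion carrying the processed prefix p
def gRes (p l : List Char) : List (String × Int) :=
  match l with
  | [] => []
  | ch :: l' => (String.ofList [ch], (p.count ch : Int)) :: gRes (p ++ [ch]) l'

lemma gRes_length (l : List Char) : ∀ p, (gRes p l).length = l.length := by
  induction l with
  | nil => intro p; simp [gRes]
  | cons ch l' ih => intro p; simp [gRes, ih]

lemma gRes_get (l : List Char) : ∀ p j (h : j < l.length),
    (gRes p l)[j]? = some (String.ofList [l[j]'h], (((p ++ l.take j).count (l[j]'h)) : Int)) := by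
  induction l with
  | nil => intro p j h; simp at h
  | cons ch l' ih =>
    intro p j h
    cases j with
    | zero => simp [gRes]
    | succ j' =>
      have h' : j' < l'.length := by simpa using h
      simp only [gRes, List.getElem?_cons_succ, List.getElem_cons_succ, ih (p ++ [ch]) j' h',
        List.take_succ_cons]
      congr 2
      simp

-- ===== A side: fold with dict counter equals gRes =====
def invD (d : PySem.Dict Char Int) (p : List Char) : Prop :=
  (∀ c, d.contains c = decide (c ∈ p)) ∧ ∀ c, c ∈ p → d.getD c 0 = (p.count c : Int) - 1

lemma fold_eq_gRes (l p : List Char) (d : PySem.Dict Char Int) (acc : List (String × Int))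
    (hinv : invD d p) :
    (l.foldl aStep (d, acc)).2 = acc ++ gRes p l := by
  induction l generalizing p d acc with
  | nil => simp [gRes]
  | cons ch l' ih =>
    obtain ⟨hc, hv⟩ := hinv
    have hcount : ∀ c, c ∈ p ++ [ch] → c ≠ ch → ((p ++ [ch]).count c : Int) - 1 = (p.count c : Int) - 1 := by
      intro c hcmem h
      rw [List.count_append, List.count_cons, List.count_nil]
      simp [Ne.symm h]
    have hmemp : ∀ c, c ∈ p ++ [ch] → c ≠ ch → c ∈ p := by
      intro c hcmem h
      rcases List.mem_append.mp hcmem with h' | h'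
      · exact h'
      · simp at h'; exact absurd h' h
    by_cases hmem : ch ∈ p
    · have hcc : d.contains ch = true := by rw [hc]; simp [hmem]
      have hval : (d.modify ch 0 (· + 1)).getD ch 0 = (p.count ch : Int) := by
        rw [PySem.Dict.getD_modify_self, hv ch hmem]; ring
      have hinv' : invD (d.modify ch 0 (· + 1)) (p ++ [ch]) := by
        constructor
        · intro c
          rw [PySem.Dict.contains_modify, hc]
          by_cases h : c = ch <;> simp [h, hmem]
        · intro c hcmem
          rw [PySem.Dict.getD_modify]
          by_cases h : c = ch
          · subst h; rw [hv c hmem]; simp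
          · rw [if_neg h, hv c (hmemp c hcmem h), hcount c hcmem h]
      have hstep : aStep (d, acc) ch
          = (d.modify ch 0 (· + 1), acc ++ [(String.ofList [ch], (p.count ch : Int))]) := by
        simp [aStep, hcc, hval]
      rw [List.foldl_cons, hstep, ih (p ++ [ch]) _ _ hinv']
      simp [gRes]
    · have hcc : d.contains ch = false := by rw [hc]; simp [hmem]
      have hval : (d.insert ch 0).getD ch 0 = (p.count ch : Int) := by
        rw [PySem.Dict.getD_insert_self]
        simp [List.count_eq_zero_of_not_mem hmem]
      have hinv' : invD (d.insert ch 0) (p ++ [ch]) := by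
        constructor
        · intro c
          rw [PySem.Dict.contains_insert, hc]
          by_cases h : c = ch <;> simp [h]
        · intro c hcmem
          rw [PySem.Dict.getD_insert]
          by_cases h : c = ch
          · subst h; simp [List.count_eq_zero_of_not_mem hmem]
          · rw [if_neg h, hv c (hmemp c hcmem h), hcount c hcmem h]
      have hstep : aStep (d, acc) ch
          = (d.insert ch 0, acc ++ [(String.ofList [ch], (p.count ch : Int))]) := by
        simp [aStep, hcc, hval]
      rw [List.foldl_cons, hstep, ih (p ++ [ch]) _ _ hinv']
      simp [gRes]

-- ===== B side: scatter equals gRes, pointwise =====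
lemma bInner_length (c : Char) : ∀ (l : List Char) i k out, (bInner c l i k out).length = out.length := by
  intro l
  induction l with
  | nil => intro i k out; simp [bInner]
  | cons ch l' ih =>
    intro i k out
    by_cases h : ch = c <;> simp [bInner, h, ih]

lemma bInner_get (c : Char) : ∀ (l : List Char) i0 k out j,
    i0 + l.length = out.length → j < out.length →
    (bInner c l i0 k out)[j]? =
      if l[j - i0]? = some c ∧ i0 ≤ j then
        some (some (String.ofList [c], k + ((l.take (j - i0)).count c : Int)))
      else out[j]? := by
  intro l
  induction l with
  | nil =>
    intro i0 k out j hlen hj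
    simp [bInner]
  | cons ch l' ih =>
    intro i0 k out j hlen hj
    have hi0lt : i0 < out.length := by simp at hlen; omega
    by_cases hch : ch = c
    · subst hch
      rw [bInner, if_pos rfl]
      have hlen' : (i0 + 1) + l'.length = (out.set i0 (some (String.ofList [ch], k))).length := by
        simp at hlen ⊢; omega
      rw [ih (i0 + 1) (k + 1) _ j hlen' (by simpa using hj)]
      rcases lt_trichotomy j i0 with hlt | heq | hgt
      · have h1 : ¬ (i0 + 1 ≤ j) := by omega
        have h2 : ¬ (i0 ≤ j) := by omega
        rw [if_neg (by tauto), if_neg (by tauto), List.getElem?_set_ne (by omega)]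
      · subst heq
        have h1 : ¬ (j + 1 ≤ j) := by omega
        rw [if_neg (by tauto), List.getElem?_set_self hi0lt]
        have : (ch :: l')[j - j]? = some ch := by simp
        rw [if_pos ⟨this, le_refl j⟩]
        simp
      · have hm : j - i0 = (j - (i0 + 1)) + 1 := by omega
        have hcons : (ch :: l')[j - i0]? = l'[j - (i0 + 1)]? := by rw [hm]; simp
        have htake : (ch :: l').take (j - i0) = ch :: l'.take (j - (i0 + 1)) := by rw [hm]; simp
        by_cases hc' : l'[j - (i0 + 1)]? = some ch
        · rw [if_pos ⟨hc', by omega⟩, if_pos ⟨by rw [hcons]; exact hc', by omega⟩]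
          rw [htake]
          simp
          ring
        · rw [if_neg (by tauto), if_neg (by rw [hcons]; tauto),
            List.getElem?_set_ne (by omega)]
    · rw [bInner, if_neg hch]
      have hlen' : (i0 + 1) + l'.length = out.length := by simp at hlen ⊢; omega
      rw [ih (i0 + 1) k out j hlen' hj]
      rcases lt_trichotomy j i0 with hlt | heq | hgt
      · rw [if_neg (fun h => absurd h.2 (by omega)), if_neg (fun h => absurd h.2 (by omega))]
      · subst heq
        have hne : ¬ ((ch :: l')[j - j]? = some c ∧ j ≤ j) := by
          simp [hch]
        rw [if_neg (fun h => absurd h.2 (by omega)), if_neg hne]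
      · have hm : j - i0 = (j - (i0 + 1)) + 1 := by omega
        have hcons : (ch :: l')[j - i0]? = l'[j - (i0 + 1)]? := by rw [hm]; simp
        have htake : (ch :: l').take (j - i0) = ch :: l'.take (j - (i0 + 1)) := by rw [hm]; simp
        by_cases hc' : l'[j - (i0 + 1)]? = some c
        · rw [if_pos ⟨hc', by omega⟩, if_pos ⟨by rw [hcons]; exact hc', by omega⟩, htake]
          simp [hch]
        · rw [if_neg (by tauto), if_neg (by rw [hcons]; tauto)]

lemma fold_get (s : List Char) : ∀ (ds : List Char) out j (hj : j < s.length),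
    out.length = s.length →
    (ds.foldl (fun o c => bInner c s 0 0 o) out)[j]? =
      if s[j]'hj ∈ ds then
        some (some (String.ofList [s[j]'hj], ((s.take j).count (s[j]'hj) : Int)))
      else out[j]? := by
  intro ds
  induction ds with
  | nil => intro out j hj hl; simp
  | cons c ds' ih =>
    intro out j hj hl
    rw [List.foldl_cons]
    have hl' : (bInner c s 0 0 out).length = s.length := by rw [bInner_length]; exact hl
    rw [ih _ j hj hl']
    have hget := bInner_get c s 0 0 out j (by omega) (by omega)
    simp only [Nat.sub_zero, Nat.zero_le, and_true] at hget
    have hsj : s[j]? = some (s[j]'hj) := List.getElem?_eq_getElem hj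
    by_cases hmem : s[j]'hj ∈ ds'
    · rw [if_pos hmem, if_pos (by simp [hmem])]
    · rw [if_neg hmem]
      by_cases hceq : s[j]'hj = c
      · rw [if_pos (by simp [hceq]), hget, if_pos (by rw [hsj, hceq]), hceq]
        simp
      · rw [if_neg (by simp [hmem, hceq]), hget, if_neg (by rw [hsj]; simp [hceq])]

lemma alt_eq_gRes (s : List Char) :
    ((PySem.List.dedup s).foldl (fun o c => bInner c s 0 0 o)
        (List.replicate s.length (none : Option (String × Int)))).map
      (fun o => o.getD (String.ofList [], 0)) = gRes [] s := by
  have hlenf : ∀ (ds : List Char) (out : List (Option (String × Int))),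
      (ds.foldl (fun o c => bInner c s 0 0 o) out).length = out.length := by
    intro ds
    induction ds with
    | nil => intro out; simp
    | cons c ds' ih => intro out; rw [List.foldl_cons, ih, bInner_length]
  apply List.ext_getElem?
  intro j
  by_cases hj : j < s.length
  · rw [List.getElem?_map, fold_get s _ _ j hj (by simp),
      if_pos (by rw [PySem.List.mem_dedup]; exact List.getElem_mem hj),
      gRes_get s [] j hj]
    simp
  · have h1 : (gRes [] s).length ≤ j := by rw [gRes_length]; omega
    have h2 : j ≥ (((PySem.List.dedup s).foldl (fun o c => bInner c s 0 0 o)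
        (List.replicate s.length (none : Option (String × Int)))).map
      (fun o => o.getD (String.ofList [], 0))).length := by
      rw [List.length_map, hlenf]; simp; omega
    rw [List.getElem?_eq_none h2, List.getElem?_eq_none h1]

-- ===== VERDICT (by name: the statement is the Claim_ definition above) =====
theorem decorate_index_spec : Claim_equal_decorate_index := by
  intro s _
  unfold Spec_decorate_index decorate_index decorate_index_alt
  rw [alt_eq_gRes s.toList]
  have hA := fold_eq_gRes s.toList [] PySem.Dict.empty []
    ⟨fun c => by simp [PySem.Dict.contains_empty], fun c hc => absurd hc (List.not_mem_nil)⟩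
  simpa using hA
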